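-- pv_equiv track=rewrite | github.com/RajRudra06/IS_LAB_IT | IS_lab/ruk_codes/Lab 1/Extras/Rabin.py | rabin_decrypt_all_roots
-- ===== SOURCE A (Python) =====
-- def rabin_decrypt_all_roots(c, p, q):
--     """
--     Compute four square roots of c modulo n = p*q.
--     Uses the property p ≡ q ≡ 3 (mod 4) to compute roots mod p and q,
--     then combines via CRT to get four roots modulo n.
--     """
--     # compute square roots modulo p and q (since p ≡ 3 (mod 4))
--     r_p = pow(c, (p + 1) // 4, p)
--     r_q = pow(c, (q + 1) // 4, q)
--     # the other roots are negatives modulo p and q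
--     roots_p = (r_p, (-r_p) % p)
--     roots_q = (r_q, (-r_q) % q)
--
--     n = p * q
--     # precompute inverses for CRT
--     q_inv_mod_p = pow(q, -1, p)
--     p_inv_mod_q = pow(p, -1, q)
--
--     candidates = []
--     # combine each pair (rp, rq) into a root modulo n using CRT
--     for rp in roots_p:
--         for rq in roots_q:
--             # CRT recombination:
--             # m = rp * q * (q^{-1} mod p) + rq * p * (p^{-1} mod q)  (mod n)
--             m = (rp * q * q_inv_mod_p + rq * p * p_inv_mod_q) % n
--             candidates.append(m)
--     # return the list of 4 candidate integers
--     return candidates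
-- ===== SOURCE B (Python) =====
-- def rabin_decrypt_all_roots(c, p, q):
--     """
--     Compute four square roots of c modulo n = p*q (p ≡ q ≡ 3 (mod 4)),
--     using only TWO CRT recombinations: the four Rabin roots come in
--     ± pairs mod n, so the other two are the negations of the first two.
--     """
--     r_p = pow(c, (p + 1) // 4, p)
--     r_q = pow(c, (q + 1) // 4, q)
--     n = p * q
--     x = r_p * q * pow(q, -1, p)
--     y = r_q * p * pow(p, -1, q)
--     a = (x + y) % n
--     b = (x - y) % n
--     return [a, b, (-b) % n, (-a) % n]
-- ===== Notes on version B (the rewrite author's own statement) =====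
-- stated objective: simpler
-- what changed: B drops A's 2x2 nested CRT loop: it forms the two CRT sums a=(x+y)%n and b=(x-y)%n once and obtains the remaining two Rabin roots as negations (-b)%n and (-a)%n, exploiting that the four roots come in +/- pairs mod n.
import Mathlib
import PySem

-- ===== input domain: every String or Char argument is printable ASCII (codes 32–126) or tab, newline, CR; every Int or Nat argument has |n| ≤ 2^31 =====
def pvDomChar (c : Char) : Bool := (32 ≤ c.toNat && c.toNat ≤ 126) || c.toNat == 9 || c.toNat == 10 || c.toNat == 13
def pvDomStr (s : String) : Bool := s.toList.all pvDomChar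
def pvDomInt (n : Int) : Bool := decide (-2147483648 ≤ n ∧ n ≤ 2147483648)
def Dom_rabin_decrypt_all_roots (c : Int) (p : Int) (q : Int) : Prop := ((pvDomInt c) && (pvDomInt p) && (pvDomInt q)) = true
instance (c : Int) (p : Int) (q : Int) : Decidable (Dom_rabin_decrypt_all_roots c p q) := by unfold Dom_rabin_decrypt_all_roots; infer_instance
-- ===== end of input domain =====

-- B replaces A's 2×2 nested CRT loop by two CRT sums and two negations (the four
-- Rabin roots come in ± pairs mod n); objective: simpler.

-- Python's pow(b, -1, m) (m ≠ 0, gcd(b,m) = 1): modular inverse via extended gcd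
-- (Nat.gcdA is Bezout's coefficient), normalised with Python's %; exact on gcd(b,m)=1.
def pyInvMod (b m : Int) : Int :=
  PySem.Int.mod (if 0 ≤ b then Nat.gcdA b.natAbs m.natAbs else -(Nat.gcdA b.natAbs m.natAbs)) m

-- pow(b, e, m) for e : Nat, m ≠ 0, by binary exponentiation (every intermediate is
-- reduced with Python's %, so the result is the canonical residue, = PySem.Int.powMod
-- b e m = (b^e) % m, which itself cannot be evaluated for the exponents ~2^29 here).
def pyPowModAux (b : Int) (e : Nat) (m : Int) : Int :=
  if h : e = 0 then PySem.Int.mod 1 m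
  else
    let r := pyPowModAux (PySem.Int.mod (b * b) m) (e / 2) m
    if e % 2 = 1 then PySem.Int.mod (r * b) m else r
decreasing_by exact Nat.div_lt_self (Nat.pos_of_ne_zero h) (by norm_num)

-- Python's pow(b, e, m) for arbitrary int e (m ≠ 0): nonnegative exponent directly;
-- for e < 0 Python inverts b mod m and raises the inverse to |e| — ported exactly here.
def pyPowMod (b e m : Int) : Int :=
  if 0 ≤ e then pyPowModAux b e.toNat m
  else pyPowModAux (pyInvMod b m) (-e).toNat m

-- ===== PORT A =====
def rabin_decrypt_all_roots (c : Int) (p : Int) (q : Int) : List Int :=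
  let r_p := pyPowMod c (PySem.Int.floordiv (p + 1) 4) p
  let r_q := pyPowMod c (PySem.Int.floordiv (q + 1) 4) q
  let roots_p := (r_p, PySem.Int.mod (-r_p) p)
  let roots_q := (r_q, PySem.Int.mod (-r_q) q)
  let n := p * q
  let q_inv_mod_p := pyInvMod q p
  let p_inv_mod_q := pyInvMod p q
  -- 'for rp in roots_p: for rq in roots_q: candidates.append(…)' as nested folds
  [roots_p.1, roots_p.2].foldl (fun acc rp =>
    [roots_q.1, roots_q.2].foldl (fun acc2 rq =>
      acc2 ++ [PySem.Int.mod (rp * q * q_inv_mod_p + rq * p * p_inv_mod_q) n]) acc) []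

-- ===== PORT B =====
def rabin_decrypt_all_roots_alt (c : Int) (p : Int) (q : Int) : List Int :=
  let r_p := pyPowMod c (PySem.Int.floordiv (p + 1) 4) p
  let r_q := pyPowMod c (PySem.Int.floordiv (q + 1) 4) q
  let n := p * q
  let x := r_p * q * pyInvMod q p
  let y := r_q * p * pyInvMod p q
  let a := PySem.Int.mod (x + y) n
  let b := PySem.Int.mod (x - y) n
  [a, b, PySem.Int.mod (-b) n, PySem.Int.mod (-a) n]

-- ===== PRECONDITION & SPEC =====
-- Exactly where Python A returns: pow's moduli must be nonzero, pow(q,-1,p)/pow(p,-1,q)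
-- need gcd(p,q)=1, and for p (resp. q) ≤ -2 the exponent (p+1)//4 is negative, so
-- pow(c, ·, p) needs gcd(c,p)=1 (ValueError otherwise).
def Pre_rabin_decrypt_all_roots (c : Int) (p : Int) (q : Int) : Prop :=
  p ≠ 0 ∧ q ≠ 0 ∧ Int.gcd p q = 1 ∧ (p ≤ -2 → Int.gcd c p = 1) ∧ (q ≤ -2 → Int.gcd c q = 1)
instance (c : Int) (p : Int) (q : Int) : Decidable (Pre_rabin_decrypt_all_roots c p q) := by
  unfold Pre_rabin_decrypt_all_roots; infer_instance

def pvWitness_rabin_decrypt_all_roots : Int × Int × Int := (4, 7, 11)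

def Spec_rabin_decrypt_all_roots (c : Int) (p : Int) (q : Int) (out : List Int) : Prop := out = rabin_decrypt_all_roots_alt c p q
instance (c : Int) (p : Int) (q : Int) (out : List Int) : Decidable (Spec_rabin_decrypt_all_roots c p q out) := by unfold Spec_rabin_decrypt_all_roots; infer_instance

-- ===== CLAIM (what is proved, stated in full; the proofs are below) =====
def Claim_equal_rabin_decrypt_all_roots : Prop := ∀ (c : Int) (p : Int) (q : Int), Dom_rabin_decrypt_all_roots c p q → Pre_rabin_decrypt_all_roots c p q → Spec_rabin_decrypt_all_roots c p q (rabin_decrypt_all_roots c p q)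

-- ===== LEMMAS AND PROOFS =====

-- a multiple of b strictly between -|b| and |b| is 0
lemma pv_eq_zero_of_dvd_of_small (b d : Int) (hd : b ∣ d) (h1 : -|b| < d) (h2 : d < |b|) :
    d = 0 := by
  by_contra hne
  have hpos : 0 < |d| := abs_pos.mpr hne
  have hle : |b| ≤ |d| := Int.le_of_dvd hpos ((abs_dvd _ _).mpr ((dvd_abs _ _).mpr hd))
  have hlt : |d| < |b| := abs_lt.mpr ⟨h1, h2⟩
  omega

-- Python % is constant on residue classes of its (nonzero) divisor
lemma pymod_congr (a₁ a₂ b : Int) (hb : b ≠ 0) (h : b ∣ a₁ - a₂) :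
    PySem.Int.mod a₁ b = PySem.Int.mod a₂ b := by
  have h1 := PySem.Int.floordiv_mul_add_mod a₁ b
  have h2 := PySem.Int.floordiv_mul_add_mod a₂ b
  obtain ⟨k, hk⟩ := h
  have hd : b ∣ PySem.Int.mod a₁ b - PySem.Int.mod a₂ b :=
    ⟨k - PySem.Int.floordiv a₁ b + PySem.Int.floordiv a₂ b, by linear_combination hk + h1 - h2⟩
  rcases lt_or_gt_of_ne hb with hneg | hpos
  · have b1 := PySem.Int.mod_neg_bounds a₁ hneg
    have b2 := PySem.Int.mod_neg_bounds a₂ hneg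
    have := pv_eq_zero_of_dvd_of_small b _ hd (by rw [abs_of_neg hneg]; omega)
      (by rw [abs_of_neg hneg]; omega)
    omega
  · have b1l := PySem.Int.mod_nonneg a₁ hpos
    have b1r := PySem.Int.mod_lt a₁ hpos
    have b2l := PySem.Int.mod_nonneg a₂ hpos
    have b2r := PySem.Int.mod_lt a₂ hpos
    have := pv_eq_zero_of_dvd_of_small b _ hd (by rw [abs_of_pos hpos]; omega)
      (by rw [abs_of_pos hpos]; omega)
    omega

-- the 2×2 CRT table equals [a, b, -b, -a] mod n, for ANY rp rq qi pi (p,q ≠ 0)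
lemma pv_crt_lists (rp rq qi pi p q : Int) (hp : p ≠ 0) (hq : q ≠ 0) :
    [PySem.Int.mod (rp * q * qi + rq * p * pi) (p * q),
     PySem.Int.mod (rp * q * qi + PySem.Int.mod (-rq) q * p * pi) (p * q),
     PySem.Int.mod (PySem.Int.mod (-rp) p * q * qi + rq * p * pi) (p * q),
     PySem.Int.mod (PySem.Int.mod (-rp) p * q * qi + PySem.Int.mod (-rq) q * p * pi) (p * q)]
    = [PySem.Int.mod (rp * q * qi + rq * p * pi) (p * q),
       PySem.Int.mod (rp * q * qi - rq * p * pi) (p * q),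
       PySem.Int.mod (-(PySem.Int.mod (rp * q * qi - rq * p * pi) (p * q))) (p * q),
       PySem.Int.mod (-(PySem.Int.mod (rp * q * qi + rq * p * pi) (p * q))) (p * q)] := by
  have hn : p * q ≠ 0 := mul_ne_zero hp hq
  have hq2 := PySem.Int.floordiv_mul_add_mod (-rq) q
  have hp2 := PySem.Int.floordiv_mul_add_mod (-rp) p
  have hs1 := PySem.Int.floordiv_mul_add_mod (rp * q * qi + rq * p * pi) (p * q)
  have hs2 := PySem.Int.floordiv_mul_add_mod (rp * q * qi - rq * p * pi) (p * q)
  have e2 : PySem.Int.mod (rp * q * qi + PySem.Int.mod (-rq) q * p * pi) (p * q)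
      = PySem.Int.mod (rp * q * qi - rq * p * pi) (p * q) :=
    pymod_congr _ _ _ hn ⟨-(PySem.Int.floordiv (-rq) q) * pi, by linear_combination (p * pi) * hq2⟩
  have e3 : PySem.Int.mod (PySem.Int.mod (-rp) p * q * qi + rq * p * pi) (p * q)
      = PySem.Int.mod (-(PySem.Int.mod (rp * q * qi - rq * p * pi) (p * q))) (p * q) :=
    pymod_congr _ _ _ hn ⟨-(PySem.Int.floordiv (-rp) p) * qi - PySem.Int.floordiv (rp * q * qi - rq * p * pi) (p * q),
      by linear_combination (q * qi) * hp2 + hs2⟩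
  have e4 : PySem.Int.mod (PySem.Int.mod (-rp) p * q * qi + PySem.Int.mod (-rq) q * p * pi) (p * q)
      = PySem.Int.mod (-(PySem.Int.mod (rp * q * qi + rq * p * pi) (p * q))) (p * q) :=
    pymod_congr _ _ _ hn ⟨-(PySem.Int.floordiv (-rp) p) * qi - PySem.Int.floordiv (-rq) q * pi
        - PySem.Int.floordiv (rp * q * qi + rq * p * pi) (p * q),
      by linear_combination (q * qi) * hp2 + (p * pi) * hq2 + hs1⟩
  rw [e2, e3, e4]

-- ===== VERDICT (by name: the statement is the Claim_ definition above) =====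
theorem rabin_decrypt_all_roots_spec : Claim_equal_rabin_decrypt_all_roots := by
  intro c p q _ hpre
  obtain ⟨hp, hq, -, -, -⟩ := hpre
  unfold Spec_rabin_decrypt_all_roots rabin_decrypt_all_roots rabin_decrypt_all_roots_alt
  simp only [List.foldl, List.nil_append, List.cons_append]
  exact pv_crt_lists _ _ _ _ p q hp hq
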